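-- pv_equiv track=rewrite | github.com/LeoNaab/ECE253 | image_grab.py | get_linear_window
-- ===== SOURCE A (Python) =====
-- def get_linear_window(pixel_gradient, i, j, x_bound, y_bound):
--     coords = []
--     if pixel_gradient == 0:
--         for col_idx in range(j-2, j+3):
--             if col_idx >= 0 and col_idx < x_bound:
--                 coords.append((i, col_idx))
--     elif pixel_gradient == 1:
--         for row_idx, col_idx in zip(range(i+2, i-3, -1),range(j-2, j+3)):
--             if (row_idx >= 0 and row_idx < y_bound) and (col_idx >= 0 and col_idx < x_bound):
--                 coords.append((row_idx, col_idx))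
--     elif pixel_gradient == 2:
--         for row_idx in range(i-2, i+3):
--             if row_idx >= 0 and row_idx < y_bound:
--                 coords.append((row_idx, j))
--     elif pixel_gradient == 3:
--         for row_idx, col_idx in zip(range(i-2, i+3),range(j-2, j+3)):
--             if (row_idx >= 0 and row_idx < y_bound) and (col_idx >= 0 and col_idx < x_bound):
--                 coords.append((row_idx, col_idx))
--
--     return coords
-- ===== SOURCE B (Python) =====
-- def _cell(pixel_gradient, i, j, o):
--     if pixel_gradient == 0:
--         return (i, j + o)
--     if pixel_gradient == 1:
--         return (i - o, j + o)
--     if pixel_gradient == 2: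
--         return (i + o, j)
--     return (i + o, j + o)
--
-- def get_linear_window(pixel_gradient, i, j, x_bound, y_bound):
--     # Interval-intersection algorithm: the in-bounds window cells correspond to a
--     # contiguous interval of offsets o in [-2, 2]; clamp that interval once per
--     # active bound constraint, then emit the cells for the surviving offsets.
--     if pixel_gradient not in (0, 1, 2, 3):
--         return []
--     lo, hi = -2, 2
--     if pixel_gradient != 2:              # column is j + o: need 0 <= j+o < x_bound
--         lo = max(lo, -j)
--         hi = min(hi, x_bound - 1 - j)
--     if pixel_gradient == 1:              # row is i - o: need 0 <= i-o < y_bound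
--         lo = max(lo, i - y_bound + 1)
--         hi = min(hi, i)
--     elif pixel_gradient in (2, 3):       # row is i + o: need 0 <= i+o < y_bound
--         lo = max(lo, -i)
--         hi = min(hi, y_bound - 1 - i)
--     return [_cell(pixel_gradient, i, j, o) for o in range(lo, hi + 1)]
-- ===== Notes on version B (the rewrite author's own statement) =====
-- stated objective: alternative
-- what changed: Instead of A's four branch-loops that test each of the five window cells against the bounds, B computes the valid offset interval [lo,hi] in closed form by intersecting [-2,2] with the (clamped) interval each active bound constraint allows, then emits cells for exactly those offsets with no per-cell bound test.
import Mathlib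
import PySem

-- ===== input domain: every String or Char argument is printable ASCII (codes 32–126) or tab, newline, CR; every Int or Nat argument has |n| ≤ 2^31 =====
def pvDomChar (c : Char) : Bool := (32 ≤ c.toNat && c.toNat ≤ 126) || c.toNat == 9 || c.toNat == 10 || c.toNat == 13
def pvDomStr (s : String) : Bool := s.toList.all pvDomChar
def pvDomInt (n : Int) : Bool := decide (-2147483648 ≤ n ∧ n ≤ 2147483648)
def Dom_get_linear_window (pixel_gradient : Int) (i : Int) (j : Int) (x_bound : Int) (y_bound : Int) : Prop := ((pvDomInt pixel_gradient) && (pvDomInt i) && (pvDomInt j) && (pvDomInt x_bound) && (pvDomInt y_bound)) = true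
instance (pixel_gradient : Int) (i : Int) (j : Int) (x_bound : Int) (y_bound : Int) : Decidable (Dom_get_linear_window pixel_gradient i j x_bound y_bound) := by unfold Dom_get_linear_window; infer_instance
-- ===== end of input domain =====

-- B replaces A's per-cell bound tests by a closed-form intersection of offset intervals (objective: alternative algorithm).

-- ===== PORT A =====
def get_linear_window (pixel_gradient : Int) (i : Int) (j : Int) (x_bound : Int) (y_bound : Int) : List (Int × Int) :=
  if pixel_gradient = 0 then
    (PySem.List.pyRange (j - 2) (j + 3) 1).foldl
      (fun coords col_idx => if col_idx ≥ 0 ∧ col_idx < x_bound then coords ++ [(i, col_idx)] else coords) []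
  else if pixel_gradient = 1 then
    ((PySem.List.pyRange (i + 2) (i - 3) (-1)).zip (PySem.List.pyRange (j - 2) (j + 3) 1)).foldl
      (fun coords rc => if (rc.1 ≥ 0 ∧ rc.1 < y_bound) ∧ (rc.2 ≥ 0 ∧ rc.2 < x_bound) then coords ++ [(rc.1, rc.2)] else coords) []
  else if pixel_gradient = 2 then
    (PySem.List.pyRange (i - 2) (i + 3) 1).foldl
      (fun coords row_idx => if row_idx ≥ 0 ∧ row_idx < y_bound then coords ++ [(row_idx, j)] else coords) []
  else if pixel_gradient = 3 then
    ((PySem.List.pyRange (i - 2) (i + 3) 1).zip (PySem.List.pyRange (j - 2) (j + 3) 1)).foldl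
      (fun coords rc => if (rc.1 ≥ 0 ∧ rc.1 < y_bound) ∧ (rc.2 ≥ 0 ∧ rc.2 < x_bound) then coords ++ [(rc.1, rc.2)] else coords) []
  else []

-- ===== PORT B =====
def glwCell (pixel_gradient i j o : Int) : Int × Int :=
  if pixel_gradient = 0 then (i, j + o)
  else if pixel_gradient = 1 then (i - o, j + o)
  else if pixel_gradient = 2 then (i + o, j)
  else (i + o, j + o)

def get_linear_window_alt (pixel_gradient : Int) (i : Int) (j : Int) (x_bound : Int) (y_bound : Int) : List (Int × Int) :=
  if pixel_gradient = 0 ∨ pixel_gradient = 1 ∨ pixel_gradient = 2 ∨ pixel_gradient = 3 then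
    let lo : Int := -2
    let hi : Int := 2
    let lo := if pixel_gradient ≠ 2 then max lo (-j) else lo
    let hi := if pixel_gradient ≠ 2 then min hi (x_bound - 1 - j) else hi
    let lo := if pixel_gradient = 1 then max lo (i - y_bound + 1)
              else if pixel_gradient = 2 ∨ pixel_gradient = 3 then max lo (-i) else lo
    let hi := if pixel_gradient = 1 then min hi i
              else if pixel_gradient = 2 ∨ pixel_gradient = 3 then min hi (y_bound - 1 - i) else hi
    (PySem.List.pyRange lo (hi + 1) 1).map (glwCell pixel_gradient i j)
  else []

-- ===== PRECONDITION & SPEC =====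
def Spec_get_linear_window (pixel_gradient : Int) (i : Int) (j : Int) (x_bound : Int) (y_bound : Int) (out : List (Int × Int)) : Prop := out = get_linear_window_alt pixel_gradient i j x_bound y_bound
instance (pixel_gradient : Int) (i : Int) (j : Int) (x_bound : Int) (y_bound : Int) (out : List (Int × Int)) : Decidable (Spec_get_linear_window pixel_gradient i j x_bound y_bound out) := by unfold Spec_get_linear_window; infer_instance

-- ===== CLAIM (what is proved, stated in full; the proofs are below) =====
def Claim_equal_get_linear_window : Prop := ∀ (pixel_gradient : Int) (i : Int) (j : Int) (x_bound : Int) (y_bound : Int), Dom_get_linear_window pixel_gradient i j x_bound y_bound → Spec_get_linear_window pixel_gradient i j x_bound y_bound (get_linear_window pixel_gradient i j x_bound y_bound)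

-- ===== LEMMAS AND PROOFS =====

lemma win5 (a : Int) : PySem.List.pyRange (a - 2) (a + 3) 1 = [a - 2, a - 1, a, a + 1, a + 2] := by
  rw [PySem.List.pyRange_one]
  simp [List.range_succ]
  refine ⟨by ring, by ring, by ring⟩

lemma win5d (a : Int) : PySem.List.pyRange (a + 2) (a - 3) (-1) = [a + 2, a + 1, a, a - 1, a - 2] := by
  rw [PySem.List.pyRange_neg_one]
  simp [List.range_succ]
  refine ⟨by ring, by ring, by ring⟩

lemma range_eq_filter (lo hi : Int) (hlo : -2 ≤ lo) (hhi : hi ≤ 2) :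
    PySem.List.pyRange lo (hi + 1) 1
      = ([-2, -1, 0, 1, 2] : List Int).filter (fun o => decide (lo ≤ o) && decide (o ≤ hi)) := by
  rcases (by omega : lo ≤ hi ∨ hi < lo) with h | h
  · have h1 : lo ≤ 2 := le_trans h hhi
    interval_cases lo <;> interval_cases hi <;> decide
  · rw [PySem.List.pyRange_one_eq_nil (by omega)]
    simp only [List.filter]
    have e : ∀ o : Int, (decide (lo ≤ o) && decide (o ≤ hi)) = false := by
      intro o
      by_cases hc : lo ≤ o
      · simp [hc]; omega
      · simp [hc]
    simp [e]

-- ===== VERDICT (by name: the statement is the Claim_ definition above) =====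
set_option maxHeartbeats 1600000 in
theorem get_linear_window_spec : Claim_equal_get_linear_window := by
  intro g i j xb yb _
  unfold Spec_get_linear_window get_linear_window get_linear_window_alt
  by_cases h0 : g = 0
  · subst h0
    norm_num
    rw [range_eq_filter (-min 2 j) (min 2 (xb - 1 - j)) (by omega) (by omega), win5 j]
    simp only [List.filter_cons, List.filter_nil, Bool.and_eq_true, decide_eq_true_eq, List.foldl, List.map, ge_iff_le, glwCell]
    simp only [show ((-min 2 j ≤ (-2:Int)) ∧ ((-2:Int) ≤ min 2 (xb-1-j))) ↔ ((0 ≤ j-2) ∧ j-2 < xb) from by omega,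
        show ((-min 2 j ≤ (-1:Int)) ∧ ((-1:Int) ≤ min 2 (xb-1-j))) ↔ ((0 ≤ j-1) ∧ j-1 < xb) from by omega,
        show ((-min 2 j ≤ (0:Int)) ∧ ((0:Int) ≤ min 2 (xb-1-j))) ↔ ((0 ≤ j) ∧ j < xb) from by omega,
        show ((-min 2 j ≤ (1:Int)) ∧ ((1:Int) ≤ min 2 (xb-1-j))) ↔ ((0 ≤ j+1) ∧ j+1 < xb) from by omega,
        show ((-min 2 j ≤ (2:Int)) ∧ ((2:Int) ≤ min 2 (xb-1-j))) ↔ ((0 ≤ j+2) ∧ j+2 < xb) from by omega]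
    split_ifs <;> norm_num [glwCell] <;> omega
  by_cases h1 : g = 1
  · subst h1
    norm_num
    rw [range_eq_filter (max (-min 2 j) (i - yb + 1)) (min 2 (min (xb - 1 - j) i)) (by omega) (by omega), win5 j, win5d i]
    simp only [List.zip, List.zipWith, List.filter_cons, List.filter_nil, Bool.and_eq_true, decide_eq_true_eq, List.foldl, ge_iff_le]
    simp only [show ((max (-min 2 j) (i - yb + 1) ≤ (-2:Int)) ∧ ((-2:Int) ≤ min 2 (min (xb-1-j) i))) ↔ ((0 ≤ i+2 ∧ i+2 < yb) ∧ (0 ≤ j-2 ∧ j-2 < xb)) from by omega,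
        show ((max (-min 2 j) (i - yb + 1) ≤ (-1:Int)) ∧ ((-1:Int) ≤ min 2 (min (xb-1-j) i))) ↔ ((0 ≤ i+1 ∧ i+1 < yb) ∧ (0 ≤ j-1 ∧ j-1 < xb)) from by omega,
        show ((max (-min 2 j) (i - yb + 1) ≤ (0:Int)) ∧ ((0:Int) ≤ min 2 (min (xb-1-j) i))) ↔ ((0 ≤ i ∧ i < yb) ∧ (0 ≤ j ∧ j < xb)) from by omega,
        show ((max (-min 2 j) (i - yb + 1) ≤ (1:Int)) ∧ ((1:Int) ≤ min 2 (min (xb-1-j) i))) ↔ ((0 ≤ i-1 ∧ i-1 < yb) ∧ (0 ≤ j+1 ∧ j+1 < xb)) from by omega,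
        show ((max (-min 2 j) (i - yb + 1) ≤ (2:Int)) ∧ ((2:Int) ≤ min 2 (min (xb-1-j) i))) ↔ ((0 ≤ i-2 ∧ i-2 < yb) ∧ (0 ≤ j+2 ∧ j+2 < xb)) from by omega]
    split_ifs <;> norm_num [glwCell] <;> omega
  by_cases h2 : g = 2
  · subst h2
    norm_num
    rw [range_eq_filter (-min 2 i) (min 2 (yb - 1 - i)) (by omega) (by omega), win5 i]
    simp only [List.filter_cons, List.filter_nil, Bool.and_eq_true, decide_eq_true_eq, List.foldl, ge_iff_le]
    simp only [show ((-min 2 i ≤ (-2:Int)) ∧ ((-2:Int) ≤ min 2 (yb-1-i))) ↔ ((0 ≤ i-2) ∧ i-2 < yb) from by omega,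
        show ((-min 2 i ≤ (-1:Int)) ∧ ((-1:Int) ≤ min 2 (yb-1-i))) ↔ ((0 ≤ i-1) ∧ i-1 < yb) from by omega,
        show ((-min 2 i ≤ (0:Int)) ∧ ((0:Int) ≤ min 2 (yb-1-i))) ↔ ((0 ≤ i) ∧ i < yb) from by omega,
        show ((-min 2 i ≤ (1:Int)) ∧ ((1:Int) ≤ min 2 (yb-1-i))) ↔ ((0 ≤ i+1) ∧ i+1 < yb) from by omega,
        show ((-min 2 i ≤ (2:Int)) ∧ ((2:Int) ≤ min 2 (yb-1-i))) ↔ ((0 ≤ i+2) ∧ i+2 < yb) from by omega]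
    split_ifs <;> norm_num [glwCell] <;> omega
  by_cases h3 : g = 3
  · subst h3
    norm_num
    rw [range_eq_filter (-min 2 (min j i)) (min 2 (min (xb - 1 - j) (yb - 1 - i))) (by omega) (by omega), win5 i, win5 j]
    simp only [List.zip, List.zipWith, List.filter_cons, List.filter_nil, Bool.and_eq_true, decide_eq_true_eq, List.foldl, ge_iff_le]
    simp only [show ((-min 2 (min j i) ≤ (-2:Int)) ∧ ((-2:Int) ≤ min 2 (min (xb-1-j) (yb-1-i)))) ↔ ((0 ≤ i-2 ∧ i-2 < yb) ∧ (0 ≤ j-2 ∧ j-2 < xb)) from by omega,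
        show ((-min 2 (min j i) ≤ (-1:Int)) ∧ ((-1:Int) ≤ min 2 (min (xb-1-j) (yb-1-i)))) ↔ ((0 ≤ i-1 ∧ i-1 < yb) ∧ (0 ≤ j-1 ∧ j-1 < xb)) from by omega,
        show ((-min 2 (min j i) ≤ (0:Int)) ∧ ((0:Int) ≤ min 2 (min (xb-1-j) (yb-1-i)))) ↔ ((0 ≤ i ∧ i < yb) ∧ (0 ≤ j ∧ j < xb)) from by omega,
        show ((-min 2 (min j i) ≤ (1:Int)) ∧ ((1:Int) ≤ min 2 (min (xb-1-j) (yb-1-i)))) ↔ ((0 ≤ i+1 ∧ i+1 < yb) ∧ (0 ≤ j+1 ∧ j+1 < xb)) from by omega,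
        show ((-min 2 (min j i) ≤ (2:Int)) ∧ ((2:Int) ≤ min 2 (min (xb-1-j) (yb-1-i)))) ↔ ((0 ≤ i+2 ∧ i+2 < yb) ∧ (0 ≤ j+2 ∧ j+2 < xb)) from by omega]
    split_ifs <;> norm_num [glwCell] <;> omega
  · simp [h0, h1, h2, h3]
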